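-- pv_equiv track=rewrite | github.com/alxwen711/contestSubmissionArchive | codeforces/live contests/2023-2/e148/c.py | solve
-- ===== SOURCE A (Python) =====
-- def solve(n,ar):
--     same = True
--     inc = True
--     ans = 1
--     for j in range(n-1):
--         a,b = ar[j],ar[j+1]
--         if same:
--             if a < b:
--                 same = False
--                 ans += 1
--                 inc = True
--             elif a > b:
--                 same = False
--                 ans += 1
--                 inc = False
--         else:
--             if inc and a > b:
--                 inc = False
--                 ans += 1
--             elif not inc and a < b:
--                 inc = True
--                 ans += 1
--     return ans
-- ===== SOURCE B (Python) =====
-- def solve(n, ar):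
--     if n <= 1:
--         return 1
--     # compress consecutive duplicates, then count strict local extrema
--     b = []
--     for x in ar[:n]:
--         if not b or b[-1] != x:
--             b.append(x)
--     if len(b) < 2:
--         return 1
--     return 2 + sum(1 for i in range(1, len(b) - 1)
--                    if (b[i] - b[i - 1]) * (b[i] - b[i + 1]) > 0)
-- ===== Notes on version B (the rewrite author's own statement) =====
-- stated objective: alternative
-- what changed: B drops A's same/inc flag state machine entirely: it compresses consecutive duplicates into a list b, then counts strict local extrema of b with the sign-free product test (b[i]-b[i-1])*(b[i]-b[i+1])>0, returning 2 plus that count (1 when b has fewer than 2 elements).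
import Mathlib
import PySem

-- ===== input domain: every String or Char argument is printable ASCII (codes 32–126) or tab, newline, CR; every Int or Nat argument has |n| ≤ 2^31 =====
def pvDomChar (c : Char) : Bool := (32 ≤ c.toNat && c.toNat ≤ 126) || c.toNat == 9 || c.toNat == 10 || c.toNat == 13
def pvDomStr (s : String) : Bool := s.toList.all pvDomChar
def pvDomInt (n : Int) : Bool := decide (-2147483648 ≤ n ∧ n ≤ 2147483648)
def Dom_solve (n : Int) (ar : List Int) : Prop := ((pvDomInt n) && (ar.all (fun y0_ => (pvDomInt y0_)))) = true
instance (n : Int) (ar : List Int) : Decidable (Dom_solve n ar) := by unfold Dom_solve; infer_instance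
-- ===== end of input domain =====

-- B replaces A's same/inc flag state machine by a different algorithm: compress consecutive
-- duplicates, then count strict local extrema with the product test (b[i]-b[i-1])*(b[i]-b[i+1])>0;
-- same cost, different algorithmic idea.


-- ===== PORT A =====
-- ar[j] is always in range inside Pre_solve; the .getD 0 default is never reached there.
def solve (n : Int) (ar : List Int) : Int :=
  (((PySem.List.pyRange 0 (n - 1) 1).foldl
    (fun (st : Bool × Bool × Int) j =>
      let a := (PySem.List.pyGet? ar j).getD 0
      let b := (PySem.List.pyGet? ar (j + 1)).getD 0
      let same := st.1; let inc := st.2.1; let ans := st.2.2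
      if same then
        if a < b then (false, true, ans + 1)
        else if a > b then (false, false, ans + 1)
        else st
      else
        if inc && decide (a > b) then (false, false, ans + 1)
        else if !inc && decide (a < b) then (false, true, ans + 1)
        else st)
    (true, true, 1)).2.2)

-- ===== PORT B =====
def solve_alt (n : Int) (ar : List Int) : Int :=
  if n ≤ 1 then 1 else
  let b := (PySem.List.slice ar none (some n)).foldl
    (fun (b : List Int) x =>
      if b = [] ∨ PySem.List.pyGet? b (-1) ≠ some x then b ++ [x] else b) []
  if b.length < 2 then 1 else
  2 + (PySem.List.pyRange 1 ((b.length : Int) - 1) 1).foldl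
    (fun acc i =>
      acc + (if ((PySem.List.pyGet? b i).getD 0 - (PySem.List.pyGet? b (i - 1)).getD 0)
               * ((PySem.List.pyGet? b i).getD 0 - (PySem.List.pyGet? b (i + 1)).getD 0) > 0
             then (1 : Int) else 0)) 0

-- ===== PRECONDITION & SPEC =====
-- Pre_ excludes exactly the inputs with 2 ≤ n and n > len(ar), on which A raises IndexError.
def Pre_solve (n : Int) (ar : List Int) : Prop := n ≤ ar.length ∨ n ≤ 1
instance (n : Int) (ar : List Int) : Decidable (Pre_solve n ar) := by unfold Pre_solve; infer_instance
def pvWitness_solve : Int × List Int := (4, [1, 3, 2, 2])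
def Spec_solve (n : Int) (ar : List Int) (out : Int) : Prop := out = solve_alt n ar
instance (n : Int) (ar : List Int) (out : Int) : Decidable (Spec_solve n ar out) := by unfold Spec_solve; infer_instance

-- ===== CLAIM (what is proved, stated in full; the proofs are below) =====
def Claim_equal_solve : Prop := ∀ (n : Int) (ar : List Int), Dom_solve n ar → Pre_solve n ar → Spec_solve n ar (solve n ar)

-- ===== LEMMAS AND PROOFS =====

-- sign of one step: +1 down, -1 up, 0 equal (as A's comparisons see it)
def sgn (a b : Int) : Int := (if b < a then (1 : Int) else 0) - (if b > a then (1 : Int) else 0)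

def signAt (ar : List Int) (j : Int) : Int :=
  sgn ((PySem.List.pyGet? ar j).getD 0) ((PySem.List.pyGet? ar (j + 1)).getD 0)

-- A's loop step, named for the proofs
def stepA (ar : List Int) (st : Bool × Bool × Int) (j : Int) : Bool × Bool × Int :=
  let a := (PySem.List.pyGet? ar j).getD 0
  let b := (PySem.List.pyGet? ar (j + 1)).getD 0
  let same := st.1; let inc := st.2.1; let ans := st.2.2
  if same then
    if a < b then (false, true, ans + 1)
    else if a > b then (false, false, ans + 1)
    else st
  else
    if inc && decide (a > b) then (false, false, ans + 1)
    else if !inc && decide (a < b) then (false, true, ans + 1)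
    else st

-- number of positions whose value differs from its predecessor, seeded with p
def cnt (p : Int) : List Int → Int
  | [] => 0
  | s :: r => (if s ≠ p then 1 else 0) + cnt s r

-- adjacent changes inside a list
def chg : List Int → Int
  | a :: b :: r => (if b ≠ a then 1 else 0) + chg (b :: r)
  | _ => 0

-- signs of consecutive pairs
def sl : List Int → List Int
  | a :: b :: r => sgn a b :: sl (b :: r)
  | _ => []

-- consecutive-duplicate compression
def ddp : List Int → List Int
  | [] => []
  | [x] => [x]
  | x :: y :: r => if x = y then ddp (y :: r) else x :: ddp (y :: r)

-- strict local extrema count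
def extS : List Int → Int
  | x :: y :: z :: r => (if (y - x) * (y - z) > 0 then 1 else 0) + extS (y :: z :: r)
  | _ => 0

-- adjacent elements pairwise distinct
def adjNe : List Int → Prop
  | x :: y :: r => x ≠ y ∧ adjNe (y :: r)
  | _ => True

-- encode A's state from the previous nonzero sign (0 = none seen yet)
def stA (p ans : Int) : Bool × Bool × Int :=
  (decide (p = 0), decide (p = 0 ∨ p = -1), ans)

theorem sgn_eq_zero_iff (a b : Int) : sgn a b = 0 ↔ a = b := by
  unfold sgn; split_ifs <;> omega

theorem foldA_cnt (ar : List Int) (L : List Int) (p ans : Int)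
    (hp : p = 0 ∨ p = -1 ∨ p = 1) :
    (L.foldl (stepA ar) (stA p ans)).2.2
      = ans + cnt p ((L.map (signAt ar)).filter (fun s => s ≠ 0)) := by
  induction L generalizing p ans with
  | nil => simp [stA, cnt]
  | cons j r ih =>
    simp only [List.foldl, List.map, List.filter]
    rcases lt_trichotomy ((PySem.List.pyGet? ar j).getD 0) ((PySem.List.pyGet? ar (j+1)).getD 0) with h | h | h
    · have hs : signAt ar j = -1 := by
        simp only [signAt, sgn]
        rw [if_neg (by omega), if_pos (by omega)]; norm_num
      rcases hp with rfl | rfl | rfl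
      · have hA : stepA ar (stA 0 ans) j = stA (-1) (ans + 1) := by
          simp [stepA, stA, h]
        rw [hA, ih (-1) (ans+1) (by omega), hs]
        simp [cnt]; ring
      · have hA : stepA ar (stA (-1) ans) j = stA (-1) ans := by
          simp [stepA, stA, not_lt.mpr (le_of_lt h)]
        rw [hA, ih (-1) ans (by omega), hs]
        simp [cnt]
      · have hA : stepA ar (stA 1 ans) j = stA (-1) (ans + 1) := by
          simp [stepA, stA, h]
        rw [hA, ih (-1) (ans+1) (by omega), hs]
        simp [cnt]; ring
    · have hs : signAt ar j = 0 := by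
        simp only [signAt, sgn]
        rw [if_neg (by omega), if_neg (by omega)]; norm_num
      have hA : stepA ar (stA p ans) j = stA p ans := by
        rcases hp with rfl | rfl | rfl <;> simp [stepA, stA, h]
      rw [hA, ih p ans hp, hs]
      simp
    · have hs : signAt ar j = 1 := by
        simp only [signAt, sgn]
        rw [if_pos (by omega), if_neg (by omega)]; norm_num
      rcases hp with rfl | rfl | rfl
      · have hA : stepA ar (stA 0 ans) j = stA 1 (ans + 1) := by
          simp [stepA, stA, h, not_lt.mpr (le_of_lt h)]
        rw [hA, ih 1 (ans+1) (by omega), hs]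
        simp [cnt]; ring
      · have hA : stepA ar (stA (-1) ans) j = stA 1 (ans + 1) := by
          simp [stepA, stA, h]
        rw [hA, ih 1 (ans+1) (by omega), hs]
        simp [cnt]; ring
      · have hA : stepA ar (stA 1 ans) j = stA 1 ans := by
          simp [stepA, stA, not_lt.mpr (le_of_lt h)]
        rw [hA, ih 1 ans (by omega), hs]
        simp [cnt]

-- the mapped index range of signs IS the structural sign list of the prefix
theorem range_sl (xs : List Int) (m : Nat) (hm : m ≤ xs.length) :
    (List.range (m - 1)).map (fun k => sgn (xs.getD k 0) (xs.getD (k + 1) 0))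
      = sl (xs.take m) := by
  induction xs generalizing m with
  | nil =>
    have hm0 : m = 0 := Nat.le_zero.mp hm
    subst hm0
    simp [sl]
  | cons a r ih =>
    match m with
    | 0 => simp [sl]
    | 1 => simp [sl]
    | (k + 2) =>
      match r with
      | [] => simp at hm
      | b :: r' =>
        have hr : (k + 2) - 1 = k + 1 := rfl
        rw [hr, List.range_succ_eq_map, List.map_cons, List.map_map]
        have h2 := ih (k + 1) (by simpa using Nat.succ_le_succ_iff.mp hm)
        rw [Nat.add_sub_cancel, List.take_succ_cons] at h2
        rw [List.take_succ_cons, List.take_succ_cons,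
            show sl (a :: b :: r'.take k) = sgn a b :: sl (b :: r'.take k) from rfl]
        rw [← h2]
        refine congrArg₂ List.cons rfl ?_
        apply List.map_congr_left
        intro j _
        simp [Function.comp, List.getD, Nat.succ_eq_add_one]

theorem cnt_chg (L : List Int) (a : Int) : cnt a L = chg (a :: L) := by
  induction L generalizing a with
  | nil => simp [cnt, chg]
  | cons s r ih => simp only [cnt, chg, ih]

-- ddp keeps the head
theorem ddp_cons (r : List Int) (y : Int) : ∃ t, ddp (y :: r) = y :: t := by
  induction r generalizing y with
  | nil => exact ⟨[], rfl⟩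
  | cons z r' ih =>
    by_cases h : y = z
    · subst h; obtain ⟨t, ht⟩ := ih y; exact ⟨t, by simpa [ddp] using ht⟩
    · obtain ⟨t, ht⟩ := ih z; exact ⟨z :: t, by simp [ddp, h, ht]⟩

theorem filter_sl_ddp (xs : List Int) :
    (sl xs).filter (fun s => s ≠ 0) = sl (ddp xs) := by
  induction xs with
  | nil => simp [sl, ddp]
  | cons x t ih =>
    match t, ih with
    | [], _ => simp [sl, ddp]
    | y :: r, ih =>
      by_cases h : x = y
      · subst h
        have hz : sgn x x = 0 := (sgn_eq_zero_iff x x).mpr rfl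
        rw [show sl (x :: x :: r) = sgn x x :: sl (x :: r) from rfl,
            show ddp (x :: x :: r) = ddp (x :: r) from by rw [ddp, if_pos rfl],
            List.filter_cons, if_neg (by simp [hz])]
        exact ih
      · have hz : ¬ sgn x y = 0 := fun hc => h ((sgn_eq_zero_iff x y).mp hc)
        obtain ⟨t', ht'⟩ := ddp_cons r y
        rw [show sl (x :: y :: r) = sgn x y :: sl (y :: r) from rfl,
            show ddp (x :: y :: r) = x :: ddp (y :: r) from by rw [ddp, if_neg h],
            List.filter_cons, if_pos (by simp [hz]), ih, ht']
        rfl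

-- the python append-loop computes ddp
theorem foldl_app_ddp (xs : List Int) (t : List Int) (y : Int) :
    (xs.foldl
      (fun (b : List Int) x =>
        if b = [] ∨ PySem.List.pyGet? b (-1) ≠ some x then b ++ [x] else b)
      (t ++ [y])) = t ++ [y] ++ (ddp (y :: xs)).tail := by
  induction xs generalizing t y with
  | nil => simp [ddp]
  | cons x r ih =>
    by_cases h : y = x
    · subst h
      have hl : PySem.List.pyGet? (t ++ [y]) (-1) = some y := by
        rw [PySem.List.pyGet?_neg_one]; simp
      simp only [List.foldl, hl, ddp]
      have : ¬ ((t ++ [y] = []) ∨ some y ≠ some y) := by simp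
      rw [if_neg this]
      exact ih t y
    · have hl : PySem.List.pyGet? (t ++ [y]) (-1) = some y := by
        rw [PySem.List.pyGet?_neg_one]; simp
      have hc : ((t ++ [y] = []) ∨ PySem.List.pyGet? (t ++ [y]) (-1) ≠ some x) := by
        right; rw [hl]; simp [h]
      simp only [List.foldl, if_pos hc]
      have h2 : t ++ [y] ++ [x] = (t ++ [y]) ++ [x] := by simp
      rw [h2]
      have := ih (t ++ [y]) x
      rw [this]
      obtain ⟨t', ht'⟩ := ddp_cons r x
      simp [ddp, h, ht']

theorem foldl_ddp (xs : List Int) :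
    (xs.foldl
      (fun (b : List Int) x =>
        if b = [] ∨ PySem.List.pyGet? b (-1) ≠ some x then b ++ [x] else b)
      []) = ddp xs := by
  match xs with
  | [] => rfl
  | x :: r =>
    have e : (if ([] : List Int) = [] ∨ PySem.List.pyGet? ([] : List Int) (-1) ≠ some x
        then ([] : List Int) ++ [x] else []) = [x] := by simp
    rw [List.foldl_cons, e]
    have h1 := foldl_app_ddp r [] x
    simp only [List.nil_append] at h1
    rw [h1]
    obtain ⟨t, ht⟩ := ddp_cons r x
    simp [ht]

theorem ddp_chain (xs : List Int) : adjNe (ddp xs) := by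
  induction xs with
  | nil => trivial
  | cons x t ih =>
    match t, ih with
    | [], _ => trivial
    | y :: r, ih =>
      by_cases h : x = y
      · subst h; simpa [ddp] using ih
      · obtain ⟨t', ht'⟩ := ddp_cons r y
        rw [show ddp (x :: y :: r) = x :: ddp (y :: r) from by rw [ddp, if_neg h], ht']
        rw [ht'] at ih
        exact ⟨h, ih⟩

theorem chg_sl_ext (b : List Int) (hc : adjNe b) :
    chg (sl b) = extS b := by
  induction b with
  | nil => rfl
  | cons x t ih =>
    match t, ih, hc with
    | [], _, _ => rfl
    | [y], _, _ => rfl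
    | y :: z :: r, ih, hc =>
      have hxy : x ≠ y := hc.1
      have hc' : adjNe (y :: z :: r) := hc.2
      have hyz : y ≠ z := hc'.1
      show (if sgn y z ≠ sgn x y then (1:Int) else 0) + chg (sgn y z :: sl (z :: r))
        = (if (y - x) * (y - z) > 0 then 1 else 0) + extS (y :: z :: r)
      have h1 : chg (sgn y z :: sl (z :: r)) = chg (sl (y :: z :: r)) := rfl
      rw [h1, ih hc']
      congr 1
      have hiff : (sgn y z ≠ sgn x y) ↔ (y - x) * (y - z) > 0 := by
        rw [gt_iff_lt, mul_pos_iff]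
        unfold sgn
        split_ifs <;> constructor <;> intro h <;> omega
      by_cases h : sgn y z ≠ sgn x y
      · rw [if_pos h, if_pos (hiff.mp h)]
      · rw [if_neg h, if_neg (fun hp => h (hiff.mpr hp))]

theorem range_ext (b : List Int) :
    ((List.range (b.length - 2)).map
      (fun k => if (b.getD (k + 1) 0 - b.getD k 0) * (b.getD (k + 1) 0 - b.getD (k + 2) 0) > 0
                then (1 : Int) else 0)).sum = extS b := by
  induction b with
  | nil => rfl
  | cons x t ih =>
    match t, ih with
    | [], _ => rfl
    | [y], _ => rfl
    | y :: z :: r, ih =>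
      have hlen : (x :: y :: z :: r).length - 2 = r.length + 1 := by simp
      rw [hlen, List.range_succ_eq_map, List.map_cons, List.map_map, List.sum_cons]
      rw [show extS (x :: y :: z :: r)
            = (if (y - x) * (y - z) > 0 then (1 : Int) else 0) + extS (y :: z :: r) from rfl]
      have hlen2 : (y :: z :: r).length - 2 = r.length := by simp
      rw [← ih, hlen2]
      refine congrArg₂ (· + ·) rfl ?_
      apply congrArg List.sum
      apply List.map_congr_left
      intro k _
      simp [Function.comp, List.getD, Nat.succ_eq_add_one]

-- fold-with-add is the sum of the mapped list
theorem foldl_add_sum (L : List Int) (f : Int → Int) (c : Int) :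
    L.foldl (fun acc i => acc + f i) c = c + (L.map f).sum := by
  induction L generalizing c with
  | nil => simp
  | cons x r ih => simp only [List.foldl, List.map, List.sum_cons, ih]; ring

-- cnt from seed 0 over the sign list of a duplicate-free b of length ≥ 2
theorem cnt_sl (b : List Int) (hc : adjNe b) (hb : 2 ≤ b.length) :
    cnt 0 (sl b) = 1 + extS b := by
  match b, hc, hb with
  | x :: y :: r, hc, _ =>
    have hxy : x ≠ y := hc.1
    have hz : ¬ sgn x y = 0 := fun hcc => hxy ((sgn_eq_zero_iff x y).mp hcc)
    show (if sgn x y ≠ 0 then (1:Int) else 0) + cnt (sgn x y) (sl (y :: r)) = _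
    rw [if_pos hz, cnt_chg]
    have : chg (sgn x y :: sl (y :: r)) = chg (sl (x :: y :: r)) := rfl
    rw [this, chg_sl_ext _ hc]

-- ===== VERDICT (by name: the statement is the Claim_ definition above) =====
theorem solve_spec : Claim_equal_solve := by
  intro n ar _ hpre
  unfold Spec_solve solve solve_alt
  have hA : (fun (st : Bool × Bool × Int) j =>
      let a := (PySem.List.pyGet? ar j).getD 0
      let b := (PySem.List.pyGet? ar (j + 1)).getD 0
      let same := st.1; let inc := st.2.1; let ans := st.2.2
      if same then
        if a < b then (false, true, ans + 1)
        else if a > b then (false, false, ans + 1)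
        else st
      else
        if inc && decide (a > b) then (false, false, ans + 1)
        else if !inc && decide (a < b) then (false, true, ans + 1)
        else st) = stepA ar := rfl
  have h0 : ((true, true, (1 : Int)) : Bool × Bool × Int) = stA 0 1 := by simp [stA]
  rw [hA, h0, foldA_cnt ar _ 0 1 (by omega)]
  by_cases hn : n ≤ 1
  · -- range(n-1) is empty on both sides
    rw [if_pos hn]
    have : PySem.List.pyRange 0 (n - 1) 1 = [] := by
      rw [PySem.List.pyRange_one]
      have : (n - 1 - 0).toNat = 0 := by omega
      rw [this]; rfl
    rw [this]; simp [cnt]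
  · rw [if_neg hn]
    have hlen : n ≤ (ar.length : Int) := by
      rcases hpre with h | h
      · exact h
      · omega
    -- rewrite A's sign range into sl of the prefix
    have hmap : (PySem.List.pyRange 0 (n - 1) 1).map (signAt ar)
        = sl (ar.take n.toNat) := by
      rw [PySem.List.pyRange_one, List.map_map]
      have hNat : (n - 1 - 0).toNat = n.toNat - 1 := by omega
      rw [hNat, ← range_sl ar n.toNat (by omega)]
      apply List.map_congr_left
      intro k _
      show signAt ar (0 + (k : Int)) = _
      have hk0 : (0 : Int) + (k : Int) = ((k : Nat) : Int) := by omega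
      have hk1 : ((k : Nat) : Int) + 1 = ((k + 1 : Nat) : Int) := by push_cast; ring
      simp only [signAt, hk0, hk1, PySem.List.pyGet?_natCast]
      simp [List.getD]
    rw [hmap]
    -- B's slice is the same prefix, and its loop is ddp
    have hslice : PySem.List.slice ar none (some n) = ar.take n.toNat :=
      PySem.List.slice_to ar (by omega)
    rw [hslice, foldl_ddp]
    set xs := ar.take n.toNat with hxs
    set b := ddp xs with hb
    have hfil : (sl xs).filter (fun s => s ≠ 0) = sl b := filter_sl_ddp xs
    have hchain : adjNe b := ddp_chain xs
    rw [hfil]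
    by_cases hsmall : b.length < 2
    · rw [if_pos hsmall]
      have : sl b = [] := by
        match b, hsmall with
        | [], _ => rfl
        | [_], _ => rfl
      rw [this]; simp [cnt]
    · rw [if_neg hsmall]
      rw [cnt_sl b hchain (by omega)]
      -- B's extrema fold
      have hfold : (PySem.List.pyRange 1 ((b.length : Int) - 1) 1).foldl
          (fun acc i =>
            acc + (if ((PySem.List.pyGet? b i).getD 0 - (PySem.List.pyGet? b (i - 1)).getD 0)
                     * ((PySem.List.pyGet? b i).getD 0 - (PySem.List.pyGet? b (i + 1)).getD 0) > 0
                   then (1 : Int) else 0)) 0 = extS b := by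
        rw [foldl_add_sum, PySem.List.pyRange_one, List.map_map]
        have hNat : ((b.length : Int) - 1 - 1).toNat = b.length - 2 := by omega
        rw [hNat, ← range_ext b]
        have : ((List.range (b.length - 2)).map
            ((fun i => if ((PySem.List.pyGet? b i).getD 0 - (PySem.List.pyGet? b (i - 1)).getD 0)
                     * ((PySem.List.pyGet? b i).getD 0 - (PySem.List.pyGet? b (i + 1)).getD 0) > 0
                   then (1 : Int) else 0) ∘ (fun (k : Nat) => (1 : Int) + (k : Int))))
            = (List.range (b.length - 2)).map
              (fun k => if (b.getD (k + 1) 0 - b.getD k 0) * (b.getD (k + 1) 0 - b.getD (k + 2) 0) > 0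
                then (1 : Int) else 0) := by
          apply List.map_congr_left
          intro k _
          have e1 : (1 : Int) + (k : Int) = ((k + 1 : Nat) : Int) := by push_cast; ring
          have e2 : ((k + 1 : Nat) : Int) - 1 = ((k : Nat) : Int) := by push_cast; ring
          have e3 : ((k + 1 : Nat) : Int) + 1 = ((k + 2 : Nat) : Int) := by push_cast; ring
          simp only [Function.comp_apply]
          simp only [e1]
          simp only [e2, e3]
          simp only [PySem.List.pyGet?_natCast]
          simp [List.getD]
        rw [this]
        ring
      rw [hfold]
      ring
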